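-- pv_equiv track=rewrite | github.com/HexmosTech/FreeDevTools | frontend/scripts/update_updated_at/bump_etag.py | filter_table_cols
-- ===== SOURCE A (Python) =====
-- def filter_table_cols(table_cols, column_arg):
--     if not column_arg:
--         return table_cols
--     # Ensure column_arg is a list if it's passed as a single string (for safety) or append
--     if isinstance(column_arg, str):
--         column_arg = [column_arg]
--
--     filtered = []
--     # Deduplicate in case they pass the same arg multiple times
--     for table, col in table_cols:
--         matched = False
--         for arg in column_arg:
--             if arg == "overview" and table == "overview":
--                 matched = True
--             elif arg == "category" and table in ("category", "cluster", "ipm_category"):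
--                 matched = True
--             elif arg == "subcategory" and table == "sub_category":
--                 matched = True
--             elif arg == "end_page" and table not in ("overview", "category", "sub_category", "cluster", "ipm_category"):
--                 matched = True
--
--         if matched:
--             filtered.append((table, col))
--
--     # Deduplicate the output list
--     return list(dict.fromkeys(filtered))
-- ===== SOURCE B (Python) =====
-- def filter_table_cols(table_cols, column_arg):
--     if not column_arg:
--         return table_cols
--     if isinstance(column_arg, str):
--         column_arg = [column_arg]
--     # Stage 1: fold the args once into an 'allowed tables' set (via a mapping
--     # from arg name to the table names it selects) plus an end_page flag.
--     tables_for = {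
--         "overview": ("overview",),
--         "category": ("category", "cluster", "ipm_category"),
--         "subcategory": ("sub_category",),
--     }
--     special = ("overview", "category", "sub_category", "cluster", "ipm_category")
--     allowed = set()
--     end_page = False
--     for arg in column_arg:
--         if arg == "end_page":
--             end_page = True
--         else:
--             allowed.update(tables_for.get(arg, ()))
--     # Stage 2: one pass over the rows with the dedup fused in (first-occurrence
--     # seen set), instead of filtering first and deduplicating afterwards.
--     out = []
--     seen = set()
--     for t, c in table_cols:
--         if (t in allowed or (end_page and t not in special)) and (t, c) not in seen:
--             seen.add((t, c))
--             out.append((t, c))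
--     return out
-- ===== Notes on version B (the rewrite author's own statement) =====
-- stated objective: alternative
-- what changed: B folds the args once into an allowed-tables set (via an arg-to-tables mapping dict) plus an end_page flag, then filters the rows in one pass with the first-occurrence dedup fused in via a seen set, instead of A's per-row inner loop over the args followed by a separate dict.fromkeys dedup pass.
import Mathlib
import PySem

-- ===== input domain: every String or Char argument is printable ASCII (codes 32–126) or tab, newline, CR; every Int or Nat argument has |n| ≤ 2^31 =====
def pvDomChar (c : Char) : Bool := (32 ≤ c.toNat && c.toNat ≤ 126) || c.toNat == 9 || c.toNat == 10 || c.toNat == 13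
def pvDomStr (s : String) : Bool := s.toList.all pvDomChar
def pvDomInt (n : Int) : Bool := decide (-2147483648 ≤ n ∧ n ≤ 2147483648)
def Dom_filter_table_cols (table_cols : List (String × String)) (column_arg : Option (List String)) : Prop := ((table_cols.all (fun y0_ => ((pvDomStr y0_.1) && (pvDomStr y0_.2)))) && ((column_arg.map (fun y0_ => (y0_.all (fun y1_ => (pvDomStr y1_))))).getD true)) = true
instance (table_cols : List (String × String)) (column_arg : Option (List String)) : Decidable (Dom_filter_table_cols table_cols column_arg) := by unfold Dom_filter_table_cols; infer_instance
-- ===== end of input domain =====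

-- B replaces A's per-row inner loop over the args (plus a separate dedup pass) by a staged
-- design: fold the args once into an allowed-tables set via an arg→tables mapping plus an
-- end_page flag, then one pass over the rows with the first-occurrence dedup fused in
-- (objective: simpler). Return-value equivalence; no mutation.

-- ===== PORT A =====
-- inner `for arg in column_arg` loop body (elif chain updating `matched`)
def ftcMatch (t : String) (m : Bool) (arg : String) : Bool :=
  if arg == "overview" && t == "overview" then true
  else if arg == "category" && (t == "category" || t == "cluster" || t == "ipm_category") then true
  else if arg == "subcategory" && t == "sub_category" then true
  else if arg == "end_page" && !(t == "overview" || t == "category" || t == "sub_category" || t == "cluster" || t == "ipm_category") then true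
  else m

def filter_table_cols (table_cols : List (String × String)) (column_arg : Option (List String)) : List (String × String) :=
  match column_arg with
  | none => table_cols          -- `if not column_arg: return table_cols` (None case)
  | some args =>
    if args.isEmpty then table_cols   -- `if not column_arg` (empty-list case)
    else
      -- the isinstance(str) coercion cannot fire under the typed signature (args is a list)
      let filtered := table_cols.foldl (fun acc p =>
        let matched := args.foldl (ftcMatch p.1) false
        if matched then acc ++ [p] else acc) []
      PySem.List.dedup filtered       -- list(dict.fromkeys(filtered))

-- ===== PORT B =====
-- the `tables_for` dict literal of Source B
def ftcTablesFor : PySem.Dict String (List String) :=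
  ((PySem.Dict.empty.insert "overview" ["overview"]).insert
      "category" ["category", "cluster", "ipm_category"]).insert
      "subcategory" ["sub_category"]

-- the `special` tuple of Source B
def ftcSpecial : List String := ["overview", "category", "sub_category", "cluster", "ipm_category"]

def filter_table_cols_alt (table_cols : List (String × String)) (column_arg : Option (List String)) : List (String × String) :=
  match column_arg with
  | none => table_cols
  | some args =>
    if args.isEmpty then table_cols
    else
      -- stage 1: `for arg in column_arg: …` building (allowed, end_page)
      let st := args.foldl (fun st arg =>
        if arg == "end_page" then (st.1, true)
        else (PySem.Set.update st.1 (ftcTablesFor.getD arg []), st.2))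
        ((PySem.Set.empty : PySem.Set String), false)
      -- stage 2: `for t, c in table_cols: …` with the fused seen-set dedup
      (table_cols.foldl (fun (s : List (String × String) × PySem.Set (String × String)) p =>
        if (PySem.Set.contains st.1 p.1 || (st.2 && !ftcSpecial.contains p.1))
             && !PySem.Set.contains s.2 p
        then (s.1 ++ [p], PySem.Set.add s.2 p) else s)
        (([] : List (String × String)), (PySem.Set.empty : PySem.Set (String × String)))).1

-- ===== PRECONDITION & SPEC =====
def Spec_filter_table_cols (table_cols : List (String × String)) (column_arg : Option (List String)) (out : List (String × String)) : Prop := out = filter_table_cols_alt table_cols column_arg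
instance (table_cols : List (String × String)) (column_arg : Option (List String)) (out : List (String × String)) : Decidable (Spec_filter_table_cols table_cols column_arg out) := by unfold Spec_filter_table_cols; infer_instance

-- ===== CLAIM =====
def Claim_equal_filter_table_cols : Prop := ∀ (table_cols : List (String × String)) (column_arg : Option (List String)), Dom_filter_table_cols table_cols column_arg → Spec_filter_table_cols table_cols column_arg (filter_table_cols table_cols column_arg)

-- ===== LEMMAS AND PROOFS =====

-- one argument's contribution to A's `matched`, as a plain disjunction
def ftcOne (arg t : String) : Bool :=
  (arg == "overview" && t == "overview") ||
  (arg == "category" && (t == "category" || t == "cluster" || t == "ipm_category")) ||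
  (arg == "subcategory" && t == "sub_category") ||
  (arg == "end_page" && !(t == "overview" || t == "category" || t == "sub_category" || t == "cluster" || t == "ipm_category"))

theorem ftcMatch_eq (t : String) (m : Bool) (arg : String) :
    ftcMatch t m arg = (m || ftcOne arg t) := by
  unfold ftcMatch ftcOne
  cases h1 : (arg == "overview" && t == "overview") <;>
  cases h2 : (arg == "category" && (t == "category" || t == "cluster" || t == "ipm_category")) <;>
  cases h3 : (arg == "subcategory" && t == "sub_category") <;>
  cases h4 : (arg == "end_page" && !(t == "overview" || t == "category" || t == "sub_category" || t == "cluster" || t == "ipm_category")) <;>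
  simp

theorem foldl_ftcMatch (args : List String) (t : String) (m : Bool) :
    args.foldl (ftcMatch t) m = (m || args.any (fun a => ftcOne a t)) := by
  induction args generalizing m with
  | nil => simp
  | cons a as ih => simp [List.foldl_cons, ftcMatch_eq, ih, Bool.or_assoc]

-- the dict literal, lookups resolved
theorem getD_ftcTablesFor (a : String) :
    ftcTablesFor.getD a [] =
      if a == "overview" then ["overview"]
      else if a == "category" then ["category", "cluster", "ipm_category"]
      else if a == "subcategory" then ["sub_category"]
      else [] := by
  by_cases h1 : a = "overview"
  · subst h1; rfl
  · by_cases h2 : a = "category"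
    · subst h2; rfl
    · by_cases h3 : a = "subcategory"
      · subst h3; rfl
      · have e : ftcTablesFor = PySem.Dict.mk [("overview", ["overview"]),
            ("category", ["category", "cluster", "ipm_category"]),
            ("subcategory", ["sub_category"])] := by rfl
        have g1 : ("overview" == a) = false := by simp; exact fun hh => h1 hh.symm
        have g2 : ("category" == a) = false := by simp; exact fun hh => h2 hh.symm
        have g3 : ("subcategory" == a) = false := by simp; exact fun hh => h3 hh.symm
        rw [e]
        simp [PySem.Dict.getD, PySem.Dict.get?, List.find?, g1, g2, g3, h1, h2, h3]

theorem contains_update_bool (s : PySem.Set String) (xs : List String) (t : String) :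
    PySem.Set.contains (PySem.Set.update s xs) t = (PySem.Set.contains s t || xs.contains t) := by
  rw [Bool.eq_iff_iff]
  simp [PySem.Set.mem_update]

-- stage-1 fold, first component: membership in `allowed`
theorem fst_fold_contains (args : List String) (s : PySem.Set String) (t : String) :
    PySem.Set.contains (args.foldl (fun s1 a =>
        if a == "end_page" then s1 else PySem.Set.update s1 (ftcTablesFor.getD a [])) s) t
      = (PySem.Set.contains s t || args.any (fun a => (ftcTablesFor.getD a []).contains t)) := by
  induction args generalizing s with
  | nil => simp
  | cons a as ih =>
    cases h : a == "end_page" with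
    | true =>
      have ha : a = "end_page" := eq_of_beq h
      subst ha
      have h0 : ftcTablesFor.getD "end_page" ([] : List String) = [] := by rfl
      simp only [List.foldl_cons, if_pos h, List.any_cons, h0, List.contains_nil, Bool.false_or]
      exact ih s
    | false =>
      rw [List.foldl_cons, if_neg (by simp [h]), ih, contains_update_bool, List.any_cons,
        Bool.or_assoc]

-- splitting one ftcOne clause into Source B's (allowed-tables, end_page) view
theorem ftcOne_split (a t : String) :
    ftcOne a t = ((ftcTablesFor.getD a []).contains t
      || ((a == "end_page") && !ftcSpecial.contains t)) := by
  rw [getD_ftcTablesFor]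
  by_cases h1 : a = "overview"
  · subst h1; simp [ftcOne, ftcSpecial, eq_comm, Bool.beq_eq_decide_eq]
  · by_cases h2 : a = "category"
    · subst h2; simp [ftcOne, ftcSpecial, Bool.or_assoc, Bool.beq_eq_decide_eq]
    · by_cases h3 : a = "subcategory"
      · subst h3; simp [ftcOne, ftcSpecial, eq_comm, Bool.beq_eq_decide_eq]
      · by_cases h4 : a = "end_page"
        · subst h4; simp [ftcOne, ftcSpecial, eq_comm, Bool.beq_eq_decide_eq, Bool.and_assoc]
        · simp [ftcOne, ftcSpecial, h1, h2, h3, h4, Bool.beq_eq_decide_eq]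

theorem any_ftcOne_split (args : List String) (t : String) :
    args.any (fun a => ftcOne a t)
      = (args.any (fun a => (ftcTablesFor.getD a []).contains t)
          || (args.any (fun a => a == "end_page") && !ftcSpecial.contains t)) := by
  induction args with
  | nil => simp
  | cons a as ih =>
    rw [List.any_cons, List.any_cons, List.any_cons, ih, ftcOne_split]
    generalize (ftcTablesFor.getD a []).contains t = b1
    generalize (a == "end_page") = b2
    generalize as.any (fun a => (ftcTablesFor.getD a []).contains t) = b3
    generalize as.any (fun a => a == "end_page") = b4
    generalize ftcSpecial.contains t = b5
    revert b1 b2 b3 b4 b5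
    decide

-- A's per-row predicate equals B's precomputed one
theorem pred_pointwise (args : List String) (t : String) :
    args.foldl (ftcMatch t) false
      = (PySem.Set.contains (args.foldl (fun st arg =>
            if arg == "end_page" then (st.1, true)
            else (PySem.Set.update st.1 (ftcTablesFor.getD arg []), st.2))
            ((PySem.Set.empty : PySem.Set String), false)).1 t
         || ((args.foldl (fun st arg =>
            if arg == "end_page" then (st.1, true)
            else (PySem.Set.update st.1 (ftcTablesFor.getD arg []), st.2))
            ((PySem.Set.empty : PySem.Set String), false)).2
             && !ftcSpecial.contains t)) := by
  have hsplit : (fun (st : PySem.Set String × Bool) (arg : String) =>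
      if arg == "end_page" then (st.1, true)
      else (PySem.Set.update st.1 (ftcTablesFor.getD arg []), st.2))
    = fun st arg =>
      ((if arg == "end_page" then st.1 else PySem.Set.update st.1 (ftcTablesFor.getD arg [])),
       (if arg == "end_page" then true else st.2)) := by
    funext st arg; cases h : arg == "end_page" <;> rfl
  rw [foldl_ftcMatch, Bool.false_or, any_ftcOne_split, hsplit,
    PySem.List.foldl_prod_mk
      (f := fun s1 a => if a == "end_page" then s1 else PySem.Set.update s1 (ftcTablesFor.getD a []))
      (g := fun b a => if a == "end_page" then true else b)]
  rw [fst_fold_contains, PySem.List.foldl_if_true_eq]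
  simp

-- ordered dedup seeded with a seen set (spelled out for the fused loop)
def dedupFrom {α : Type} [BEq α] (s : PySem.Set α) : List α → List α
  | [] => []
  | x :: l => if PySem.Set.contains s x then dedupFrom s l
              else x :: dedupFrom (PySem.Set.add s x) l

-- B's stage-2 fold computes a seeded dedup of the filtered rows
theorem fused_foldl {α : Type} [BEq α] (q : α → Bool) (xs : List α)
    (acc : List α) (seen : PySem.Set α) :
    (xs.foldl (fun (s : List α × PySem.Set α) p =>
        if q p && !PySem.Set.contains s.2 p then (s.1 ++ [p], PySem.Set.add s.2 p) else s)
      (acc, seen)).1 = acc ++ dedupFrom seen (xs.filter q) := by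
  induction xs generalizing acc seen with
  | nil => simp [dedupFrom]
  | cons x xs ih =>
    rw [List.foldl_cons]
    cases hq : q x with
    | false =>
      rw [if_neg (by simp), ih, List.filter_cons_of_neg (by simp [hq])]
    | true =>
      cases hc : List.contains seen x with
      | true =>
        have e : dedupFrom seen (x :: List.filter q xs) = dedupFrom seen (List.filter q xs) := by
          simp only [dedupFrom]; rw [if_pos (by simpa using hc)]
        rw [if_neg (by simp [hc]), ih, List.filter_cons_of_pos (by simp [hq]), e]
      | false =>
        have e : dedupFrom seen (x :: List.filter q xs)
            = x :: dedupFrom (PySem.Set.add seen x) (List.filter q xs) := by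
          simp only [dedupFrom]; rw [if_neg (by simp [hc])]
        rw [if_pos (by simp [hc]), ih, List.filter_cons_of_pos (by simp [hq]), e]
        simp

theorem append_dedupFrom {α : Type} [BEq α] (l : List α) (s : PySem.Set α) :
    s ++ dedupFrom s l = l.foldl PySem.Set.add s := by
  induction l generalizing s with
  | nil => simp [dedupFrom]
  | cons x l ih =>
    cases hc : List.contains s x with
    | true =>
      have ha : PySem.Set.add s x = s := by simp [PySem.Set.add, hc]
      have e : dedupFrom s (x :: l) = dedupFrom s l := by
        simp only [dedupFrom]; rw [if_pos (by simpa using hc)]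
      rw [e, List.foldl_cons, ha]
      exact ih s
    | false =>
      have ha : PySem.Set.add s x = s ++ [x] := by simp [PySem.Set.add, hc]
      have e : dedupFrom s (x :: l) = x :: dedupFrom (PySem.Set.add s x) l := by
        simp only [dedupFrom]; rw [if_neg (by simp [hc])]
      rw [e, List.foldl_cons, ha, ← ih (s ++ [x])]
      simp

theorem dedup_eq_dedupFrom {α : Type} [BEq α] (l : List α) :
    PySem.List.dedup l = dedupFrom PySem.Set.empty l := by
  have := append_dedupFrom l (PySem.Set.empty : PySem.Set α)
  simpa [PySem.Set.empty, PySem.List.dedup, PySem.Set.ofList_eq_foldl] using this.symm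

-- ===== VERDICT =====
theorem filter_table_cols_spec : Claim_equal_filter_table_cols := by
  intro table_cols column_arg _
  unfold Spec_filter_table_cols filter_table_cols filter_table_cols_alt
  cases column_arg with
  | none => rfl
  | some args =>
    cases h : args.isEmpty
    · simp only [h, Bool.false_eq_true, if_false]
      rw [fused_foldl]
      have hA : (table_cols.foldl (fun acc p =>
          if args.foldl (ftcMatch p.1) false then acc ++ [p] else acc) []) =
          table_cols.filter (fun p => args.foldl (ftcMatch p.1) false) := by
        simpa using PySem.List.foldl_append_if_eq_filter
          (p := fun p : String × String => args.foldl (ftcMatch p.1) false)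
          (l := table_cols) (acc := [])
      simp only [hA, List.nil_append]
      rw [dedup_eq_dedupFrom]
      congr 1
      apply List.filter_congr
      intro p _
      exact pred_pointwise args p.1
    · simp [h]
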